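-- pv_equiv track=rewrite | github.com/bahadir-bakla/musicmath | music_math/analysis/palindromic.py | detect_retrograde_motion
-- ===== SOURCE A (Python) =====
-- from typing import List, Tuple, Dict, Optional
--
-- def detect_retrograde_motion(
--     pitches: List[int],
--     min_length: int = 6,
--     window_size: int = 8
-- ) -> bool:
--     """
--     Retrograde hareket tespiti (tersine melodik hareket).
--
--     Args:
--         pitches: Pitch değerleri
--         min_length: Minimum uzunluk
--         window_size: Kontrol pencere boyutu
--
--     Returns:
--         True ise retrograde hareket var
--     """
--     n = len(pitches)
--
--     for i in range(n - 2 * window_size + 1):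
--         window1 = pitches[i:i + window_size]
--         window2 = pitches[i + window_size:i + 2 * window_size]
--
--         # İkinci pencere birincinin tersi mi?
--         if window2 == window1[::-1]:
--             return True
--
--     return False
-- ===== SOURCE B (Python) =====
-- def detect_retrograde_motion(pitches, min_length=6, window_size=8):
--     n = len(pitches)
--     w = window_size if window_size > 0 else 0
--     for c in range(w, n - w + 1):
--         r = 0
--         while r < w and pitches[c - 1 - r] == pitches[c + r]:
--             r += 1
--         if r == w:
--             return True
--     return False
-- ===== Notes on version B (the rewrite author's own statement) =====
-- stated objective: alternative
-- what changed: Instead of materialising two window_size-long slices (one reversed) at every start position, B scans each even-palindrome centre and compares mirrored elements one by one, stopping at the first mismatch, so no list copies are made.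
import Mathlib
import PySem

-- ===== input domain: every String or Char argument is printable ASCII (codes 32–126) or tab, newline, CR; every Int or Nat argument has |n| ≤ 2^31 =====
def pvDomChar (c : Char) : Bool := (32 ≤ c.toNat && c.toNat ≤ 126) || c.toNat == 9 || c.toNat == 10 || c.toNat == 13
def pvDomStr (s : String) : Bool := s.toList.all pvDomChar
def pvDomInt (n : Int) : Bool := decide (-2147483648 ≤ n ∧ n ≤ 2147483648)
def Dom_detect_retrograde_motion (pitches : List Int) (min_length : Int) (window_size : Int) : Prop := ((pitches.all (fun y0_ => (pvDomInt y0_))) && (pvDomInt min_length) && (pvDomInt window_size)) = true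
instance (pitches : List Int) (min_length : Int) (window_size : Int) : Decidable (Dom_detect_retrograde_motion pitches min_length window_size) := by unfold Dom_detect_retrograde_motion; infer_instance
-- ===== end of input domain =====

-- B replaces A's per-position pair of window copies (slice + reversed slice at every
-- position) by a centre-expansion scan that compares mirrored elements one by one and
-- stops at the first mismatch (no list copies); same return value everywhere.

-- ===== PORT A =====
-- the loop body: window1 = p[i:i+w]; window2 = p[i+w:i+2w]; window2 == window1[::-1]
-- (window1[::-1]: step -1 ≠ 0, so slice? is always `some` here)
def pvCondA (pitches : List Int) (window_size : Int) (i : Int) : Bool :=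
  let window1 := PySem.List.slice pitches (some i) (some (i + window_size))
  let window2 := PySem.List.slice pitches (some (i + window_size)) (some (i + 2 * window_size))
  window2 == (PySem.List.slice? window1 none none (-1)).getD []

-- 'for i in range(stop): if <cond>: return True' / 'return False', with the early return
def pvLoopA (pitches : List Int) (window_size : Int) (i stop : Int) : Bool :=
  if _h : i < stop then
    if pvCondA pitches window_size i then true
    else pvLoopA pitches window_size (i + 1) stop
  else false
termination_by (stop - i).toNat
decreasing_by omega

def detect_retrograde_motion (pitches : List Int) (min_length : Int) (window_size : Int) : Bool :=
  let n : Int := pitches.length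
  pvLoopA pitches window_size 0 (n - 2 * window_size + 1)

-- ===== PORT B =====
-- B's while loop: r = 0; while r < w and pitches[c-1-r] == pitches[c+r]: r += 1
-- (whenever the guard r < w holds, B's loop only touches indices in [c-w, c+w) ⊆ [0, n),
--  so both pyGet? are always `some`; the catch-all branch — where Python would raise
--  IndexError — is unreachable)
def pvExpand (pitches : List Int) (c : Int) (w : Int) (r : Int) : Int :=
  if _h : r < w then
    match PySem.List.pyGet? pitches (c - 1 - r), PySem.List.pyGet? pitches (c + r) with
    | some a, some b => if a == b then pvExpand pitches c w (r + 1) else r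
    | _, _ => r
  else r
termination_by (w - r).toNat
decreasing_by omega

def detect_retrograde_motion_alt (pitches : List Int) (min_length : Int) (window_size : Int) : Bool :=
  let n : Int := pitches.length
  let w : Int := if window_size > 0 then window_size else 0
  (PySem.List.pyRange w (n - w + 1) 1).any (fun c => pvExpand pitches c w 0 == w)

-- ===== PRECONDITION & SPEC =====
def Spec_detect_retrograde_motion (pitches : List Int) (min_length : Int) (window_size : Int) (out : Bool) : Prop := out = detect_retrograde_motion_alt pitches min_length window_size
instance (pitches : List Int) (min_length : Int) (window_size : Int) (out : Bool) : Decidable (Spec_detect_retrograde_motion pitches min_length window_size out) := by unfold Spec_detect_retrograde_motion; infer_instance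

-- ===== CLAIM (what is proved, stated in full; the proofs are below) =====
def Claim_equal_detect_retrograde_motion : Prop := ∀ (pitches : List Int) (min_length : Int) (window_size : Int), Dom_detect_retrograde_motion pitches min_length window_size → Spec_detect_retrograde_motion pitches min_length window_size (detect_retrograde_motion pitches min_length window_size)

-- ===== LEMMAS AND PROOFS =====

-- the mirror-match condition both programs test at a centre j+v: all v mirrored pairs agree
def pvMatch (p : List Int) (j v : Nat) : Prop :=
  ∀ k : Nat, k < v → p[j + v + k]? = p[j + v - 1 - k]?

-- B's expansion loop reaches w exactly when every remaining mirrored pair agrees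
lemma expand_spec (p : List Int) (j v : Nat) (hlen : j + 2 * v ≤ p.length) :
    ∀ r : Nat, r ≤ v →
      ((pvExpand p ((j + v : Nat) : Int) (v : Int) (r : Int) = (v : Int)) ↔
        ∀ k : Nat, r ≤ k → k < v → p[j + v + k]? = p[j + v - 1 - k]?) := by
  suffices H : ∀ m r, r ≤ v → v - r = m →
      ((pvExpand p ((j + v : Nat) : Int) (v : Int) (r : Int) = (v : Int)) ↔
        ∀ k : Nat, r ≤ k → k < v → p[j + v + k]? = p[j + v - 1 - k]?) by
    intro r hr; exact H (v - r) r hr rfl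
  intro m
  induction m with
  | zero =>
    intro r hr hm
    have hrv : r = v := by omega
    subst hrv
    rw [pvExpand, dif_neg (by omega)]
    constructor
    · intro _ k hk1 hk2; omega
    · intro _; rfl
  | succ m ih =>
    intro r hr hm
    have hrv : r < v := by omega
    rw [pvExpand, dif_pos (by exact_mod_cast hrv)]
    have e1 : ((j + v : Nat) : Int) - 1 - (r : Int) = ((j + v - 1 - r : Nat) : Int) := by omega
    have e2 : ((j + v : Nat) : Int) + (r : Int) = ((j + v + r : Nat) : Int) := by omega
    have hb1 : j + v - 1 - r < p.length := by omega
    have hb2 : j + v + r < p.length := by omega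
    rw [e1, e2, PySem.List.pyGet?_natCast, PySem.List.pyGet?_natCast,
        List.getElem?_eq_getElem hb1, List.getElem?_eq_getElem hb2]
    simp only []
    by_cases heq : p[j + v - 1 - r] = p[j + v + r]
    · rw [if_pos (by simpa using heq)]
      have e3 : (r : Int) + 1 = ((r + 1 : Nat) : Int) := by omega
      rw [e3, ih (r + 1) (by omega) (by omega)]
      constructor
      · intro h k hk1 hk2
        rcases Nat.eq_or_lt_of_le hk1 with h' | h'
        · subst h'
          rw [List.getElem?_eq_getElem (by omega), List.getElem?_eq_getElem (by omega)]
          exact congrArg some heq.symm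
        · exact h k h' hk2
      · intro h k hk1 hk2; exact h k (by omega) hk2
    · rw [if_neg (by simpa using heq)]
      constructor
      · intro h; exact absurd h (by omega)
      · intro h
        have := h r le_rfl hrv
        rw [List.getElem?_eq_getElem (by omega), List.getElem?_eq_getElem (by omega)] at this
        exact absurd (Option.some_injective _ this).symm heq

-- A's window comparison at position j holds exactly when all v mirrored pairs agree
lemma condA_iff (p : List Int) (j v : Nat) (hv : 1 ≤ v) (hlen : j + 2 * v ≤ p.length) :
    (PySem.List.slice p (some ((j : Int) + v)) (some ((j : Int) + 2 * v)) ==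
      (PySem.List.slice? (PySem.List.slice p (some (j : Int)) (some ((j : Int) + v))) none none (-1)).getD []) = true
      ↔ pvMatch p j v := by
  have e0 : (j : Int) + v = ((j : Int)) + ((v : Nat) : Int) := by ring
  have e1 : (j : Int) + v = (((j + v : Nat) : Int)) := by push_cast; ring
  have e2 : (j : Int) + 2 * v = (((j + v : Nat) : Int)) + ((v : Nat) : Int) := by push_cast; ring
  rw [PySem.List.slice?_none_none_neg_one, Option.getD_some]
  rw [show PySem.List.slice p (some ((j:Int))) (some ((j : Int) + v)) = (p.drop j).take v by
        rw [e0, PySem.List.slice_natCast_add]]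
  rw [show PySem.List.slice p (some ((j:Int) + v)) (some ((j : Int) + 2 * v)) = (p.drop (j + v)).take v by
        rw [e1, e2, PySem.List.slice_natCast_add]]
  rw [beq_iff_eq]
  have hL : ∀ k : Nat, k < v → ((p.drop j).take v).reverse[k]? = p[j + v - 1 - k]? := by
    intro k hk
    have hlt : k < ((p.drop j).take v).length := by
      rw [List.length_take, List.length_drop]; omega
    rw [List.getElem?_reverse hlt, List.length_take, List.length_drop]
    simp only [List.getElem?_take, List.getElem?_drop]
    rw [if_pos (by omega), show j + (min v (p.length - j) - 1 - k) = j + v - 1 - k by omega]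
  have hR : ∀ k : Nat, k < v → ((p.drop (j + v)).take v)[k]? = p[j + v + k]? := by
    intro k hk
    simp only [List.getElem?_take, List.getElem?_drop]
    rw [if_pos hk]
  constructor
  · intro h k hk
    have hg := congrArg (fun l => l[k]?) h
    simp only at hg
    rw [hR k hk, hL k hk] at hg
    exact hg
  · intro h
    apply List.ext_getElem?
    intro k
    by_cases hk : k < v
    · rw [hR k hk, hL k hk]; exact h k hk
    · rw [List.getElem?_eq_none (by rw [List.length_take, List.length_drop]; omega),
          List.getElem?_eq_none (by rw [List.length_reverse, List.length_take, List.length_drop]; omega)]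

-- B's condition at centre j+v, as a Bool test, is the same mirror-match condition
lemma condB_iff (p : List Int) (j v : Nat) (hlen : j + 2 * v ≤ p.length) :
    ((pvExpand p ((j + v : Nat) : Int) (v : Int) 0 == (v : Int)) = true) ↔ pvMatch p j v := by
  rw [beq_iff_eq]
  have h := expand_spec p j v hlen 0 (Nat.zero_le v)
  rw [Nat.cast_zero] at h
  rw [h]
  constructor
  · intro h k hk; exact h k (Nat.zero_le k) hk
  · intro h k _ hk; exact h k hk

-- A's early-return loop is the 'any' of its condition over the range
lemma pvLoopA_eq_any (p : List Int) (w : Int) :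
    ∀ (i stop : Int), pvLoopA p w i stop = (PySem.List.pyRange i stop 1).any (pvCondA p w) := by
  suffices H : ∀ (m : Nat) (i stop : Int), (stop - i).toNat = m →
      pvLoopA p w i stop = (PySem.List.pyRange i stop 1).any (pvCondA p w) by
    intro i stop; exact H (stop - i).toNat i stop rfl
  intro m
  induction m with
  | zero =>
    intro i stop hm
    rw [pvLoopA, dif_neg (by omega), PySem.List.pyRange_one_eq_nil (by omega)]
    rfl
  | succ m ih =>
    intro i stop hm
    have hlt : i < stop := by omega
    rw [pvLoopA, dif_pos hlt, PySem.List.pyRange_one_cons hlt, List.any_cons,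
        ih (i + 1) stop (by omega)]
    by_cases hc : pvCondA p w i
    · rw [if_pos hc, hc]; rfl
    · rw [if_neg hc, Bool.eq_false_iff.mpr hc]; rfl

-- ===== VERDICT (by name: the statement is the Claim_ definition above) =====
theorem detect_retrograde_motion_spec : Claim_equal_detect_retrograde_motion := by
  intro p ml w _dom
  unfold Spec_detect_retrograde_motion detect_retrograde_motion detect_retrograde_motion_alt
  simp only []
  rw [pvLoopA_eq_any]
  have hn : (0:Int) ≤ (p.length : Int) := Int.natCast_nonneg _
  by_cases hw : w > 0
  · rw [if_pos hw]
    refine Bool.eq_iff_iff.mpr ?_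
    simp only [List.any_eq_true, PySem.List.mem_pyRange_one, pvCondA]
    obtain ⟨v, rfl⟩ : ∃ v : Nat, w = (v : Int) := ⟨w.toNat, by omega⟩
    have hv1 : 1 ≤ v := by omega
    constructor
    · rintro ⟨i, ⟨hi0, hi1⟩, hc⟩
      have hlen : i.toNat + 2 * v ≤ p.length := by omega
      have hij : i = ((i.toNat : Nat) : Int) := by omega
      refine ⟨i + v, ⟨by omega, by omega⟩, ?_⟩
      rw [hij] at hc
      rw [show i + (v:Int) = (((i.toNat + v : Nat)) : Int) by omega]
      exact (condB_iff p i.toNat v hlen).mpr ((condA_iff p i.toNat v hv1 hlen).mp hc)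
    · rintro ⟨c, ⟨hc0, hc1⟩, hc⟩
      have hlen : (c - v).toNat + 2 * v ≤ p.length := by omega
      refine ⟨c - v, ⟨by omega, by omega⟩, ?_⟩
      rw [show c = (((c - (v:Int)).toNat + v : Nat) : Int) by omega] at hc
      have hm := (condB_iff p (c - (v:Int)).toNat v hlen).mp hc
      have := (condA_iff p (c - (v:Int)).toNat v hv1 hlen).mpr hm
      rw [show c - (v:Int) = (((c - (v:Int)).toNat : Nat) : Int) by omega]
      exact this
  · rw [if_neg hw]
    have hw0 : w ≤ 0 := by omega
    -- B's loop body succeeds immediately at c = 0 (w clamped to 0)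
    have hB : (PySem.List.pyRange 0 ((p.length : Int) - 0 + 1) 1).any
        (fun c => pvExpand p c 0 0 == 0) = true := by
      refine List.any_eq_true.mpr ⟨0, PySem.List.mem_pyRange_one.mpr ⟨le_rfl, by omega⟩, ?_⟩
      rw [pvExpand, dif_neg (lt_irrefl 0)]
      rfl
    rw [hB]
    -- A's loop hits i = len - w, where both windows are empty, hence returns True
    refine List.any_eq_true.mpr ⟨(p.length : Int) - w,
      PySem.List.mem_pyRange_one.mpr ⟨by omega, by omega⟩, ?_⟩
    have h1 : PySem.List.slice p (some ((p.length : Int) - w)) (some ((p.length : Int) - w + w)) = [] := by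
      rw [PySem.List.slice_toNat (a := (p.length : Int) - w) (b := (p.length : Int) - w + w) p (by omega) (by omega)]
      rw [List.drop_eq_nil_of_le (by omega)]
      exact List.take_nil
    have h2 : PySem.List.slice p (some ((p.length : Int) - w + w)) (some ((p.length : Int) - w + 2 * w)) = [] := by
      apply List.eq_nil_of_length_eq_zero
      rw [PySem.List.length_slice]
      have := PySem.List.clampIdx_le p.length ((p.length : Int) - w + 2 * w)
      have h3 : PySem.List.clampIdx p.length ((p.length : Int) - w + w) = p.length := by
        rw [show (p.length : Int) - w + w = ((p.length : Nat) : Int) by ring]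
        simp
      omega
    simp only [pvCondA, h1, h2, PySem.List.slice?_none_none_neg_one, Option.getD_some]
    rfl
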